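-- pv_equiv track=rewrite | github.com/ilhaam43/horila-apps-ai | apps/indonesian_nlp/management/commands/nlp_benchmark.py | _generate_test_texts
-- ===== SOURCE A (Python) =====
-- def _generate_test_texts(count, length):
--     """Generate test texts for benchmarking"""
--     base_words = [
--         'saya', 'anda', 'dia', 'kami', 'mereka', 'ini', 'itu', 'yang', 'untuk',
--         'dengan', 'dari', 'ke', 'di', 'pada', 'dalam', 'oleh', 'sebagai',
--         'sangat', 'baik', 'buruk', 'senang', 'sedih', 'marah', 'takut',
--         'Indonesia', 'Jakarta', 'Surabaya', 'Bandung', 'Medan', 'Makassar'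
--     ]
--
--     texts = []
--     for i in range(count):
--         words = []
--         for j in range(length):
--             words.append(base_words[j % len(base_words)])
--         texts.append(' '.join(words))
--
--     return texts
-- ===== SOURCE B (Python) =====
-- def _generate_test_texts(count, length):
--     """Generate test texts for benchmarking"""
--     base_words = [
--         'saya', 'anda', 'dia', 'kami', 'mereka', 'ini', 'itu', 'yang', 'untuk',
--         'dengan', 'dari', 'ke', 'di', 'pada', 'dalam', 'oleh', 'sebagai',
--         'sangat', 'baik', 'buruk', 'senang', 'sedih', 'marah', 'takut',
--         'Indonesia', 'Jakarta', 'Surabaya', 'Bandung', 'Medan', 'Makassar'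
--     ]
--     if count <= 0:
--         return []
--     full, rem = divmod(max(length, 0), len(base_words))
--     text = ' '.join(base_words * full + base_words[:rem])
--     return [text] * count
-- ===== Notes on version B (the rewrite author's own statement) =====
-- stated objective: faster
-- what changed: Replaces the per-text modulo-indexed inner loop with a one-shot divmod block construction (base_words * full + base_words[:rem]) and, since every output string is identical, joins once and replicates the string count times instead of rebuilding it per iteration.
import Mathlib
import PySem

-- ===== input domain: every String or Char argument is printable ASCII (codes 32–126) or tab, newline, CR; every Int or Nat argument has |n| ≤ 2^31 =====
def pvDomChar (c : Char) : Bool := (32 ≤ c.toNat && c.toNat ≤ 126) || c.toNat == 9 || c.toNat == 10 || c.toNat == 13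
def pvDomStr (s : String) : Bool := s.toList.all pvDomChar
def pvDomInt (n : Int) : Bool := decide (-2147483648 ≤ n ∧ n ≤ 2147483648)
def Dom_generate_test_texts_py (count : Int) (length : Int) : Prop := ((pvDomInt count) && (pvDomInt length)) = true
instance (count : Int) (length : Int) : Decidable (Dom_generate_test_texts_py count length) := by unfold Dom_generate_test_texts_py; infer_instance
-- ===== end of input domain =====

-- B builds each (identical) text once by a divmod block construction and replicates it,
-- instead of A's per-text modulo-indexed inner append loop; proved equal on all inputs.

def pvBaseWords : List String := [
  "saya", "anda", "dia", "kami", "mereka", "ini", "itu", "yang", "untuk",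
  "dengan", "dari", "ke", "di", "pada", "dalam", "oleh", "sebagai",
  "sangat", "baik", "buruk", "senang", "sedih", "marah", "takut",
  "Indonesia", "Jakarta", "Surabaya", "Bandung", "Medan", "Makassar"]

-- ===== PORT A =====
-- base_words[j % 30] is always in range (0 ≤ j % 30 < 30 = len), so pyGetD's default is never read.
def generate_test_texts_py (count : Int) (length : Int) : List String :=
  (PySem.List.pyRange 0 count 1).foldl (fun texts _i =>
    let words := (PySem.List.pyRange 0 length 1).foldl (fun ws j =>
      ws ++ [PySem.List.pyGetD pvBaseWords (PySem.Int.mod j 30) ""]) []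
    texts ++ [PySem.Str.join " " words]) []

-- ===== PORT B =====
def generate_test_texts_py_alt (count : Int) (length : Int) : List String :=
  if count ≤ 0 then [] else
  let full := PySem.Int.floordiv (max length 0) 30
  let rem := PySem.Int.mod (max length 0) 30
  let text := PySem.Str.join " "
    (PySem.List.pyRepeat pvBaseWords full ++ PySem.List.slice pvBaseWords none (some rem))
  PySem.List.pyRepeat [text] count

-- ===== PRECONDITION & SPEC =====
def Spec_generate_test_texts_py (count : Int) (length : Int) (out : List String) : Prop := out = generate_test_texts_py_alt count length
instance (count : Int) (length : Int) (out : List String) : Decidable (Spec_generate_test_texts_py count length out) := by unfold Spec_generate_test_texts_py; infer_instance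

-- ===== CLAIM (what is proved, stated in full; the proofs are below) =====
def Claim_equal_generate_test_texts_py : Prop := ∀ (count : Int) (length : Int), Dom_generate_test_texts_py count length → Spec_generate_test_texts_py count length (generate_test_texts_py count length)

-- ===== LEMMAS AND PROOFS =====

-- the first r words (r ≤ 30) of the modulo-indexed sequence are just a prefix of the word list
theorem pv_take_eq (r : Nat) (h : r ≤ 30) :
    (List.range r).map (fun k => pvBaseWords.getD (k % 30) "") = pvBaseWords.take r := by
  induction r with
  | zero => simp
  | succ n ih =>
    have hn : n < 30 := by omega
    have hlen : n < pvBaseWords.length := by simpa [pvBaseWords] using hn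
    rw [List.range_succ, List.map_append, ih (by omega), List.take_add_one]
    simp [Nat.mod_eq_of_lt hn, List.getD, List.getElem?_eq_getElem hlen]

-- the whole modulo-indexed word sequence of A is B's block construction
theorem pv_words_eq (l : Nat) :
    (List.range l).map (fun k => pvBaseWords.getD (k % 30) "") =
      (List.replicate (l / 30) pvBaseWords).flatten ++ pvBaseWords.take (l % 30) := by
  induction l using Nat.strong_induction_on with
  | _ l ih =>
    by_cases hl : l < 30
    · rw [Nat.div_eq_of_lt hl, Nat.mod_eq_of_lt hl]
      simpa using pv_take_eq l (by omega)
    · obtain ⟨m, rfl⟩ : ∃ m, l = 30 + m := ⟨l - 30, by omega⟩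
      rw [List.range_add, List.map_append]
      have h1 : (List.range 30).map (fun k => pvBaseWords.getD (k % 30) "") = pvBaseWords := by
        rw [pv_take_eq 30 (by omega)]; simp [pvBaseWords]
      have h2 : (List.map (fun x => 30 + x) (List.range m)).map
          (fun k => pvBaseWords.getD (k % 30) "") =
          (List.range m).map (fun k => pvBaseWords.getD (k % 30) "") := by
        simp [List.map_map, Function.comp, Nat.add_mod_left]
      have hdiv : (30 + m) / 30 = m / 30 + 1 := by
        rw [Nat.add_comm]; exact Nat.add_div_right m (by omega)
      have hmod : (30 + m) % 30 = m % 30 := Nat.add_mod_left 30 m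
      rw [h1, h2, ih m (by omega), hdiv, hmod, List.replicate_succ]
      simp

theorem generate_test_texts_py_eq (count length : Int) :
    generate_test_texts_py count length = generate_test_texts_py_alt count length := by
  unfold generate_test_texts_py generate_test_texts_py_alt
  by_cases hc : count ≤ 0
  · rw [if_pos hc, PySem.List.pyRange_one_eq_nil hc]; rfl
  rw [if_neg hc]
  have hmax : max length 0 = ((length.toNat : Nat) : Int) := (Int.toNat_eq_max length).symm
  have hfd : PySem.Int.floordiv (max length 0) 30 = ((length.toNat / 30 : Nat) : Int) := by
    rw [hmax]; exact_mod_cast PySem.Int.floordiv_natCast length.toNat 30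
  have hmd : PySem.Int.mod (max length 0) 30 = ((length.toNat % 30 : Nat) : Int) := by
    rw [hmax]; exact_mod_cast PySem.Int.mod_natCast length.toNat 30
  -- A's inner loop produces the block-constructed word list
  have hwords : (PySem.List.pyRange 0 length 1).foldl (fun ws j =>
      ws ++ [PySem.List.pyGetD pvBaseWords (PySem.Int.mod j 30) ""]) [] =
      PySem.List.pyRepeat pvBaseWords (PySem.Int.floordiv (max length 0) 30) ++
        PySem.List.slice pvBaseWords none (some (PySem.Int.mod (max length 0) 30)) := by
    rw [PySem.List.foldl_append_singleton_eq_map, PySem.List.pyRange_one, List.map_map,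
      hfd, hmd, PySem.List.slice_to_natCast, PySem.List.pyRepeat]
    simp only [Int.toNat_natCast, sub_zero]
    have hpt : ∀ k : Nat, PySem.List.pyGetD pvBaseWords (PySem.Int.mod ((k : Int)) 30) "" =
        pvBaseWords.getD (k % 30) "" := by
      intro k
      have h : PySem.Int.mod ((k : Int)) 30 = ((k % 30 : Nat) : Int) := by
        exact_mod_cast PySem.Int.mod_natCast k 30
      rw [h, PySem.List.pyGetD_natCast]
    simp only [Function.comp_def, zero_add, hpt]
    exact pv_words_eq length.toNat
  rw [hwords, PySem.List.foldl_append_singleton_eq_map, PySem.List.pyRepeat_singleton]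
  have : (fun (_ : Int) => PySem.Str.join " "
      (PySem.List.pyRepeat pvBaseWords (PySem.Int.floordiv (max length 0) 30) ++
        PySem.List.slice pvBaseWords none (some (PySem.Int.mod (max length 0) 30)))) =
      Function.const Int (PySem.Str.join " "
      (PySem.List.pyRepeat pvBaseWords (PySem.Int.floordiv (max length 0) 30) ++
        PySem.List.slice pvBaseWords none (some (PySem.Int.mod (max length 0) 30)))) := rfl
  rw [this, List.map_const, PySem.List.length_pyRange_one, sub_zero, List.nil_append]

-- ===== VERDICT (by name: the statement is the Claim_ definition above) =====
theorem generate_test_texts_py_spec : Claim_equal_generate_test_texts_py := by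
  intro count length _
  unfold Spec_generate_test_texts_py
  exact generate_test_texts_py_eq count length
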